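-- pv_equiv track=rewrite | github.com/tj0vtj0v/Advent_of_Code | Year_2025/Day02/Range.py | check_repeating
-- ===== SOURCE A (Python) =====
-- def check_repeating(id: int) -> bool:
--     id_length = len(str(id))
--     for step in range(1, id_length // 2 + 1):
--         if id_length % step != 0:
--             continue
--
--         valid = True
--         for start in range(0, step):
--             if len(set(str(id)[start::step])) != 1:
--                 valid = False
--                 break
--
--         if valid:
--             return True
--
--     return False
-- ===== SOURCE B (Python) =====
-- def check_repeating(id: int) -> bool:
--     s = str(id)
--     return s in (s + s)[1:-1]
-- ===== Notes on version B (the rewrite author's own statement) =====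
-- stated objective: idiomatic
-- what changed: Replaces the divisor scan with residue-class column checks by the standard doubled-string periodicity test: s is a repetition iff s occurs in (s+s)[1:-1].
import Mathlib
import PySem

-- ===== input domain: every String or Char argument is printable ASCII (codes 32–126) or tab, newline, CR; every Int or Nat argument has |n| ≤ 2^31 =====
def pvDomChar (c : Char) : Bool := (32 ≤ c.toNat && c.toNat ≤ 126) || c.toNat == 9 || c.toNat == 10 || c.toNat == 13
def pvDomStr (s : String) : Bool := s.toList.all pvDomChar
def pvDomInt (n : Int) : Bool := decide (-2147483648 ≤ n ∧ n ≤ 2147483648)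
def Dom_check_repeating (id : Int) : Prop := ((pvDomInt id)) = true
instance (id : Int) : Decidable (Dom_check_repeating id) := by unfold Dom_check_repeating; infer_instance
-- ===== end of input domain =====

-- B replaces A's divisor-and-residue-column scan by the standard doubled-string periodicity
-- test (str(id) is a repetition iff it occurs in (s+s)[1:-1]); same return value on every int.

-- ===== PORT A =====
-- inner loop 'for start in range(0, step)': returns False on the first non-constant column
def pvAInner (s : List Char) (step : Int) : List Int → Bool
  | [] => true
  | start :: rest =>
    if PySem.Set.len (PySem.Set.ofList ((PySem.List.slice? s (some start) none step).getD [])) ≠ 1 then false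
    else pvAInner s step rest

-- outer loop 'for step in range(1, id_length // 2 + 1)': 'continue' on non-divisors, early 'return True'
def pvAOuter (s : List Char) (idLen : Int) : List Int → Bool
  | [] => false
  | step :: rest =>
    if PySem.Int.mod idLen step ≠ 0 then pvAOuter s idLen rest
    else if pvAInner s step (PySem.List.pyRange 0 step) then true
    else pvAOuter s idLen rest

def check_repeating (id : Int) : Bool :=
  let idLen : Int := (PySem.Chars.len (PySem.Int.toChars id) : Int)
  pvAOuter (PySem.Int.toChars id) idLen (PySem.List.pyRange 1 (PySem.Int.floordiv idLen 2 + 1))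

-- ===== PORT B =====
def check_repeating_alt (id : Int) : Bool :=
  let s := PySem.Int.toChars id
  PySem.Chars.isIn s (PySem.Chars.slice (s ++ s) (some 1) (some (-1)))

-- ===== PRECONDITION & SPEC =====
def Spec_check_repeating (id : Int) (out : Bool) : Prop := out = check_repeating_alt id
instance (id : Int) (out : Bool) : Decidable (Spec_check_repeating id out) := by unfold Spec_check_repeating; infer_instance

-- ===== CLAIM (what is proved, stated in full; the proofs are below) =====
def Claim_equal_check_repeating : Prop := ∀ (id : Int), Dom_check_repeating id → Spec_check_repeating id (check_repeating id)

-- ===== LEMMAS AND PROOFS =====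

-- ---- rotation-invariance machinery (A ↔ B both reduce to 's has a nontrivial rotation fixing it') ----

theorem rot_fix_rot {α : Type} {s : List α} {m : ℕ} (h : s.rotate m = s) (c : ℕ) :
    (s.rotate c).rotate m = s.rotate c := by
  rw [List.rotate_rotate, Nat.add_comm, ← List.rotate_rotate, h]

theorem rot_fix_mul {α : Type} {s : List α} {m : ℕ} (h : s.rotate m = s) (q : ℕ) :
    s.rotate (m * q) = s := by
  induction q with
  | zero => simp
  | succ q ih => rw [Nat.mul_succ, ← List.rotate_rotate, ih, h]

theorem rot_fix_mod {α : Type} {s : List α} {a b : ℕ} (ha : s.rotate a = s) (hb : s.rotate b = s) :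
    s.rotate (b % a) = s := by
  conv_rhs => rw [← hb]
  conv_rhs => rw [(Nat.mod_add_div b a).symm]
  rw [← List.rotate_rotate, rot_fix_rot (rot_fix_mul ha (b / a))]

theorem rot_fix_gcd {α : Type} {s : List α} (a b : ℕ) (ha : s.rotate a = s) (hb : s.rotate b = s) :
    s.rotate (Nat.gcd a b) = s := by
  induction a, b using Nat.gcd.induction with
  | H0 b => simpa using hb
  | H1 a b hpos ih => rw [Nat.gcd_rec]; exact ih (rot_fix_mod ha hb) ha

-- ---- the residue-class-columns condition A's inner loop checks ----
def ColsEq (s : List Char) (d : ℕ) : Prop :=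
  ∀ i j, (hi : i < s.length) → (hj : j < s.length) → i % d = j % d → s[i] = s[j]

theorem rot_eq_iff_getElem {s : List Char} {d : ℕ} (hn : 0 < s.length) :
    s.rotate d = s ↔ ∀ i, (h : i < s.length) → s[(i + d) % s.length]'(Nat.mod_lt _ hn) = s[i] := by
  constructor
  · intro h i hi
    have := List.getElem_rotate s d i (by simpa [h] using hi)
    rw [List.getElem_of_eq h] at this
    exact this.symm
  · intro h
    apply List.ext_getElem (by simp)
    intro i h1 h2
    rw [List.getElem_rotate]
    exact h i h2

theorem rot_of_colsEq {s : List Char} {d : ℕ} (hn : 0 < s.length) (hdvd : d ∣ s.length)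
    (h : ColsEq s d) : s.rotate d = s := by
  rw [rot_eq_iff_getElem hn]
  intro i hi
  apply h
  have h1 := Nat.mod_mod_of_dvd (i + d) hdvd
  have h2 := Nat.add_mod_right i d
  omega

theorem colsEq_of_rot {s : List Char} {d : ℕ} (hn : 0 < s.length) (hd : 0 < d)
    (hdn : d < s.length) (h : s.rotate d = s) : ColsEq s d := by
  rw [rot_eq_iff_getElem hn] at h
  have key : ∀ i, (hi : i < s.length) → s[i] = s[i % d]'(Nat.lt_trans (Nat.mod_lt i hd) hdn) := by
    intro i
    induction i using Nat.strong_induction_on with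
    | _ i ih =>
      intro hi
      by_cases hcase : i < d
      · simp [Nat.mod_eq_of_lt hcase]
      · have hid : i - d < s.length := by omega
        have := h (i - d) hid
        have heq : (i - d + d) % s.length = i := by
          rw [Nat.sub_add_cancel (by omega)]
          exact Nat.mod_eq_of_lt hi
        simp only [heq] at this
        rw [this, ih (i - d) (by omega) hid]
        have : (i - d) % d = i % d := by
          conv_rhs => rw [show i = i - d + d by omega]
          exact (Nat.add_mod_right _ _).symm
        simp only [this]
  intro i j hi hj hij
  rw [key i hi, key j hj]
  simp only [hij]

-- ---- B's slice of the doubled string, and infix ↔ nontrivial fixed rotation ----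

theorem segment_eq_rotate (s : List Char) (k : ℕ) (hk : k ≤ s.length) :
    ((s ++ s).drop k).take s.length = s.rotate k := by
  rw [List.drop_append_of_le_length hk, List.take_append, List.rotate_eq_drop_append_take hk]
  congr 1
  · exact List.take_of_length_le (by simp)
  · congr 1; simp; omega

theorem infix_doubled_iff (s : List Char) (hn : 0 < s.length) :
    s <:+: ((s ++ s).drop 1).take (2 * s.length - 2) ↔
      ∃ k, 1 ≤ k ∧ k ≤ s.length - 1 ∧ s.rotate k = s := by
  constructor
  · intro h
    obtain ⟨u, v, huv⟩ := h
    have hlen : u.length + s.length + v.length = 2 * s.length - 2 := by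
      have := congrArg List.length huv
      simp at this
      omega
    refine ⟨u.length + 1, by omega, by omega, ?_⟩
    have hs : s = ((s ++ s).drop (u.length + 1)).take s.length := by
      have hthis : ((s ++ s).drop 1).take (2 * s.length - 2) = u ++ s ++ v := huv.symm
      calc s = ((u ++ s ++ v).drop u.length).take s.length := by
                rw [List.append_assoc, List.drop_left, List.take_left']
                rfl
           _ = ((s ++ s).drop (u.length + 1)).take s.length := by
                rw [← hthis, List.drop_take, List.drop_drop, List.take_take]
                rw [show 1 + u.length = u.length + 1 from Nat.add_comm 1 _,
                    show min s.length (2 * s.length - 2 - u.length) = s.length from by omega]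
    rw [← segment_eq_rotate s (u.length + 1) (by omega)]
    exact hs.symm
  · rintro ⟨k, hk1, hk2, hrot⟩
    have hseg := segment_eq_rotate s k (by omega)
    rw [hrot] at hseg
    have hpre : s <+: (((s ++ s).drop 1).take (2 * s.length - 2)).drop (k - 1) := by
      rw [List.drop_take, List.drop_drop, List.prefix_iff_eq_take, List.take_take]
      rw [show 1 + (k - 1) = k from by omega,
          show min s.length (2 * s.length - 2 - (k - 1)) = s.length from by omega]
      exact hseg.symm
    exact hpre.isInfix.trans
      ((((s ++ s).drop 1).take (2 * s.length - 2)).drop_suffix (k - 1)).isInfix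

-- ---- str(id) is never empty ----
theorem toDigitsCore_ne_nil' (b : ℕ) : ∀ (f n : ℕ) (l : List Char), l ≠ [] → Nat.toDigitsCore b f n l ≠ [] := by
  intro f
  induction f with
  | zero => intro n l hl; rw [Nat.toDigitsCore]; exact hl
  | succ f ih =>
    intro n l hl
    rw [Nat.toDigitsCore]
    split
    · simp
    · exact ih _ _ (by simp)

theorem toDigits_ne_nil (b n : ℕ) : Nat.toDigits b n ≠ [] := by
  rw [Nat.toDigits, Nat.toDigitsCore]
  split
  · simp
  · exact toDigitsCore_ne_nil' _ _ _ _ (by simp)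

theorem toChars_ne_nil (id : Int) : PySem.Int.toChars id ≠ [] := by
  rw [PySem.Int.toChars]
  split
  · simp
  · exact toDigits_ne_nil _ _

-- ---- the column s[start::step] as a set of residue-class entries ----
theorem lt_ceil_iff {k m d : ℕ} (hd : 0 < d) (hm : 0 < m) : k < (m + d - 1) / d ↔ d * k < m := by
  have h1 : k < (m + d - 1) / d ↔ k + 1 ≤ (m + d - 1) / d := Iff.rfl
  rw [h1, Nat.le_div_iff_mul_le hd]
  have : (k + 1) * d = d * k + d := by ring
  omega

theorem mem_column {s : List Char} {a d : ℕ} (hd : 0 < d) (ha : a < d) (han : a < s.length) (x : Char) :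
    x ∈ (PySem.List.slice? s (some (a : Int)) none (d : Int)).getD [] ↔
      ∃ i, ∃ h : i < s.length, i % d = a ∧ s[i] = x := by
  rw [PySem.List.slice?, PySem.List.sliceIndices]
  have hd0 : ¬ ((d : Int) = 0) := by omega
  have hdneg : ¬ ((d : Int) < 0) := by omega
  have haneg : ¬ ((a : Int) < 0) := by omega
  have hdpos : (0 : Int) < d := by omega
  have hmin : min (a : Int) (s.length : Int) = a := by omega
  have haln : (a : Int) < s.length := by omega
  simp only [hd0, hdneg, haneg, hmin, hdpos, haln, if_false, if_true]
  have hcast : ((s.length : Int) - a + d - 1) / d = ((s.length - a + d - 1 : Nat) : Int) / ((d : Nat) : Int) := by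
    congr 1; omega
  rw [hcast, ← Int.natCast_div, Int.toNat_natCast]
  have hidx : ∀ k : ℕ, ((a : Int) + d * k).toNat = a + d * k := by intro k; omega
  simp only [hidx, Option.getD_some, List.mem_filterMap, List.mem_range, List.getElem?_eq_some_iff]
  constructor
  · rintro ⟨k, hk, hlt, hval⟩
    exact ⟨a + d * k, hlt, by simp [Nat.add_mul_mod_self_left, Nat.mod_eq_of_lt ha], hval⟩
  · rintro ⟨i, hi, hmod, hval⟩
    refine ⟨i / d, ?_, ?_, ?_⟩
    · rw [lt_ceil_iff hd (by omega)]
      have := Nat.div_add_mod i d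
      omega
    · have := Nat.div_add_mod i d
      omega
    · have heq : a + d * (i / d) = i := by have := Nat.div_add_mod i d; omega
      simp only [heq]
      exact hval

-- ---- len(set(xs)) == 1 means: nonempty and all elements equal ----
theorem setlen_one_iff (xs : List Char) :
    PySem.Set.len (PySem.Set.ofList xs) = 1 ↔ xs ≠ [] ∧ ∀ x ∈ xs, ∀ y ∈ xs, x = y := by
  rw [PySem.Set.len]
  have hlen : ((PySem.Set.ofList xs).length : Int) = 1 ↔ (PySem.Set.ofList xs).length = 1 := by omega
  rw [hlen, List.length_eq_one_iff]
  constructor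
  · rintro ⟨c, hc⟩
    have hmem : ∀ x ∈ xs, x = c := by
      intro x hx
      have : x ∈ PySem.Set.ofList xs := (PySem.Set.mem_ofList xs x).mpr hx
      rw [hc] at this
      simpa using this
    refine ⟨?_, fun x hx y hy => (hmem x hx).trans (hmem y hy).symm⟩
    intro hnil
    rw [hnil] at hc
    simp [PySem.Set.ofList] at hc
  · rintro ⟨hnil, hall⟩
    obtain ⟨z, hz⟩ := List.exists_mem_of_ne_nil xs hnil
    refine ⟨z, ?_⟩
    have hnd := PySem.Set.nodup_ofList xs
    have hsub : ∀ x ∈ PySem.Set.ofList xs, x = z := by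
      intro x hx
      exact hall x ((PySem.Set.mem_ofList xs x).mp hx) z hz
    have hzmem : z ∈ PySem.Set.ofList xs := (PySem.Set.mem_ofList xs z).mpr hz
    match hm : PySem.Set.ofList xs, hnd, hsub, hzmem with
    | [], _, _, hzm => exact absurd hzm (by simp)
    | [b], _, hs, hzm => simp [hs b (by simp)]
    | b :: c :: t, hn, hs, hzm =>
      exfalso
      have hb := hs b (by simp)
      have hc := hs c (by simp)
      rw [List.nodup_cons] at hn
      exact hn.1 (by simp [hb, hc.symm])

-- ---- loop characterizations of the two recursions in port A ----
theorem aInner_iff (s : List Char) (step : Int) (L : List Int) :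
    pvAInner s step L = true ↔
      ∀ st ∈ L, PySem.Set.len (PySem.Set.ofList ((PySem.List.slice? s (some st) none step).getD [])) = 1 := by
  induction L with
  | nil => simp [pvAInner]
  | cons a rest ih =>
    rw [pvAInner]
    split_ifs with h
    · simp only [false_iff]
      intro hall
      exact h (hall a (by simp))
    · rw [ih]
      rw [not_ne_iff] at h
      constructor
      · intro hall st hst
        rcases List.mem_cons.mp hst with rfl | hmem
        · exact h
        · exact hall st hmem
      · intro hall st hst
        exact hall st (by simp [hst])

theorem aOuter_iff (s : List Char) (idLen : Int) (L : List Int) :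
    pvAOuter s idLen L = true ↔
      ∃ st ∈ L, PySem.Int.mod idLen st = 0 ∧ pvAInner s st (PySem.List.pyRange 0 st) = true := by
  induction L with
  | nil => simp [pvAOuter]
  | cons a rest ih =>
    rw [pvAOuter]
    split_ifs with h1 h2
    · rw [ih]
      constructor
      · rintro ⟨st, hst, hmod, hinner⟩
        exact ⟨st, by simp [hst], hmod, hinner⟩
      · rintro ⟨st, hst, hmod, hinner⟩
        rcases List.mem_cons.mp hst with rfl | hmem
        · exact absurd hmod h1
        · exact ⟨st, hmem, hmod, hinner⟩
    · simp only [true_iff]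
      exact ⟨a, by simp, by omega, h2⟩
    · rw [ih]
      constructor
      · rintro ⟨st, hst, hmod, hinner⟩
        exact ⟨st, by simp [hst], hmod, hinner⟩
      · rintro ⟨st, hst, hmod, hinner⟩
        rcases List.mem_cons.mp hst with rfl | hmem
        · exact absurd hinner h2
        · exact ⟨st, hmem, hmod, hinner⟩

theorem inner_iff_colsEq (s : List Char) (d : ℕ) (hd : 0 < d) (hdn : d ≤ s.length / 2) (hn : 0 < s.length) :
    pvAInner s (d : Int) (PySem.List.pyRange 0 (d : Int)) = true ↔ ColsEq s d := by
  rw [aInner_iff]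
  have hdn' : d < s.length := by omega
  constructor
  · intro hall i j hi hj hij
    have ha : i % d < d := Nat.mod_lt i hd
    have han : i % d < s.length := by omega
    have h1 := hall ((i % d : ℕ) : Int) (by rw [PySem.List.mem_pyRange_one]; omega)
    rw [setlen_one_iff] at h1
    have hmem := h1.2
    have hx : s[i] ∈ (PySem.List.slice? s (some ((i % d : ℕ) : Int)) none (d : Int)).getD [] := by
      rw [mem_column hd ha han]
      exact ⟨i, hi, rfl, rfl⟩
    have hy : s[j] ∈ (PySem.List.slice? s (some ((i % d : ℕ) : Int)) none (d : Int)).getD [] := by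
      rw [mem_column hd ha han]
      exact ⟨j, hj, by omega, rfl⟩
    exact hmem _ hx _ hy
  · intro hcols st hst
    rw [PySem.List.mem_pyRange_one] at hst
    obtain ⟨a, rfl⟩ : ∃ a : ℕ, st = (a : Int) := ⟨st.toNat, by omega⟩
    have ha : a < d := by omega
    have han : a < s.length := by omega
    rw [setlen_one_iff]
    constructor
    · intro hnil
      have : s[a] ∈ (PySem.List.slice? s (some (a : Int)) none (d : Int)).getD [] := by
        rw [mem_column hd ha han]
        exact ⟨a, han, Nat.mod_eq_of_lt ha, rfl⟩
      rw [hnil] at this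
      simp at this
    · intro x hx y hy
      rw [mem_column hd ha han] at hx hy
      obtain ⟨i, hi, hia, hix⟩ := hx
      obtain ⟨j, hj, hja, hjy⟩ := hy
      rw [← hix, ← hjy]
      exact hcols i j hi hj (by omega)

-- ---- A's value: some proper divisor step ≤ n/2 has all columns constant ----
theorem a_char (id : Int) :
    check_repeating id = true ↔
      ∃ d : ℕ, 1 ≤ d ∧ d ≤ (PySem.Int.toChars id).length / 2 ∧ d ∣ (PySem.Int.toChars id).length ∧
        ColsEq (PySem.Int.toChars id) d := by
  have hn : 0 < (PySem.Int.toChars id).length :=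
    List.length_pos_of_ne_nil (toChars_ne_nil id)
  rw [check_repeating]
  simp only [PySem.Chars.len_eq]
  have h2 : (2 : Int) = ((2 : ℕ) : Int) := by norm_num
  rw [h2, PySem.Int.floordiv_natCast]
  rw [aOuter_iff]
  constructor
  · rintro ⟨st, hst, hmod, hinner⟩
    rw [PySem.List.mem_pyRange_one] at hst
    obtain ⟨d, rfl⟩ : ∃ d : ℕ, st = (d : Int) := ⟨st.toNat, by omega⟩
    have hd : 0 < d := by omega
    have hdn : d ≤ (PySem.Int.toChars id).length / 2 := by omega
    refine ⟨d, hd, hdn, ?_, (inner_iff_colsEq _ d hd hdn hn).mp hinner⟩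
    have := (PySem.Int.mod_eq_zero_iff_dvd ((PySem.Int.toChars id).length : Int) (d : Int)).mp hmod
    exact_mod_cast this
  · rintro ⟨d, hd, hdn, hdvd, hcols⟩
    refine ⟨(d : Int), ?_, ?_, (inner_iff_colsEq _ d hd hdn hn).mpr hcols⟩
    · rw [PySem.List.mem_pyRange_one]; omega
    · rw [PySem.Int.mod_eq_zero_iff_dvd]
      exact_mod_cast hdvd

-- ---- B's value: s occurs in (s+s)[1:-1] ----
theorem b_char (id : Int) :
    check_repeating_alt id = true ↔
      PySem.Int.toChars id <:+:
        (((PySem.Int.toChars id) ++ (PySem.Int.toChars id)).drop 1).take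
          (2 * (PySem.Int.toChars id).length - 2) := by
  have hn : 0 < (PySem.Int.toChars id).length :=
    List.length_pos_of_ne_nil (toChars_ne_nil id)
  rw [check_repeating_alt]
  have hslice : PySem.Chars.slice ((PySem.Int.toChars id) ++ (PySem.Int.toChars id)) (some 1) (some (-1)) =
      (((PySem.Int.toChars id) ++ (PySem.Int.toChars id)).drop 1).take
        (2 * (PySem.Int.toChars id).length - 2) := by
    rw [PySem.Chars.slice_eq_listSlice, PySem.List.slice]
    rw [PySem.List.clampIdx_neg_one]
    rw [show (1 : Int) = ((1 : ℕ) : Int) from by norm_cast, PySem.List.clampIdx_natCast]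
    simp only [List.length_append]
    rw [show min 1 ((PySem.Int.toChars id).length + (PySem.Int.toChars id).length) = 1 from by omega]
    congr 1
    omega
  rw [hslice]
  constructor
  · intro h
    have := (PySem.Str.isIn_iff_infix (String.ofList (PySem.Int.toChars id))
      (String.ofList ((((PySem.Int.toChars id) ++ (PySem.Int.toChars id)).drop 1).take
          (2 * (PySem.Int.toChars id).length - 2)))).mp
    rw [PySem.Str.isIn_eq] at this
    simpa using this (by simpa using h)
  · intro h
    have := (PySem.Str.isIn_iff_infix (String.ofList (PySem.Int.toChars id))
      (String.ofList ((((PySem.Int.toChars id) ++ (PySem.Int.toChars id)).drop 1).take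
          (2 * (PySem.Int.toChars id).length - 2)))).mpr
    rw [PySem.Str.isIn_eq] at this
    simpa using this (by simpa using h)

-- ---- divisor form ↔ nontrivial fixed rotation (the heart of the equivalence) ----
theorem divisor_iff_rotation (s : List Char) (hn : 0 < s.length) :
    (∃ d : ℕ, 1 ≤ d ∧ d ≤ s.length / 2 ∧ d ∣ s.length ∧ ColsEq s d) ↔
      (∃ k, 1 ≤ k ∧ k ≤ s.length - 1 ∧ s.rotate k = s) := by
  constructor
  · rintro ⟨d, hd, hdn, hdvd, hcols⟩
    exact ⟨d, hd, by omega, rot_of_colsEq hn hdvd hcols⟩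
  · rintro ⟨k, hk1, hk2, hrot⟩
    have hg : s.rotate (Nat.gcd k s.length) = s :=
      rot_fix_gcd k s.length hrot (List.rotate_length s)
    have hgdvd : Nat.gcd k s.length ∣ s.length := Nat.gcd_dvd_right k s.length
    have hgpos : 0 < Nat.gcd k s.length := Nat.gcd_pos_of_pos_left s.length (by omega)
    have hgk : Nat.gcd k s.length ≤ k := Nat.gcd_le_left s.length (by omega)
    have hghalf : Nat.gcd k s.length ≤ s.length / 2 := by
      obtain ⟨m, hm⟩ := hgdvd
      rcases m with _ | _ | m
      · omega
      · omega
      · have hmul : Nat.gcd k s.length * (m + 1 + 1) =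
            Nat.gcd k s.length * m + Nat.gcd k s.length + Nat.gcd k s.length := by ring
        omega
    exact ⟨Nat.gcd k s.length, hgpos, hghalf, hgdvd,
      colsEq_of_rot hn hgpos (by omega) hg⟩

-- ===== VERDICT (by name: the statement is the Claim_ definition above) =====
theorem check_repeating_spec : Claim_equal_check_repeating := by
  intro id _
  unfold Spec_check_repeating
  have hn : 0 < (PySem.Int.toChars id).length :=
    List.length_pos_of_ne_nil (toChars_ne_nil id)
  have hiff : check_repeating id = true ↔ check_repeating_alt id = true := by
    rw [a_char, b_char, infix_doubled_iff _ hn, divisor_iff_rotation _ hn]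
  cases hA : check_repeating id with
  | true => exact (hiff.mp hA).symm
  | false =>
    cases hB : check_repeating_alt id with
    | true => exact absurd (hiff.mpr hB) (by simp [hA])
    | false => rfl
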